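-- pv_equiv track=rewrite | github.com/psicho/AI-training-task-classification | Statistics/lemma_statistics_H2.py | create_lemma_statistics_data_dict
-- ===== SOURCE A (Python) =====
-- def create_lemma_statistics_data_dict(tokens_list):
--     """ Calculate lemma numeration dict """
--     lemma_dict = {}
--
--     for token in tokens_list:
--         if lemma_dict.get(token['lemma_'].lower()) is None:
--             lemma_dict[token['lemma_'].lower()] = len(lemma_dict)
--         else:
--             continue
--
--     return lemma_dict
-- ===== SOURCE B (Python) =====
-- def create_lemma_statistics_data_dict(tokens_list):
--     """ Calculate lemma numeration dict """
--     keys = [token['lemma_'].lower() for token in tokens_list]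
--     distinct = sorted(set(keys), key=keys.index)
--     return {lemma: i for i, lemma in enumerate(distinct)}
-- ===== Notes on version B (the rewrite author's own statement) =====
-- stated objective: alternative
-- what changed: Replaces A's streaming insert-if-absent loop with a len()-based counter by a set-then-sort algorithm: collect all lowercased lemmas, take the set, sort it by first-occurrence index (keys.index), and number the sorted list; correct because first-occurrence indices are distinct and sorting by them recovers exactly first-appearance order.
import Mathlib
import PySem

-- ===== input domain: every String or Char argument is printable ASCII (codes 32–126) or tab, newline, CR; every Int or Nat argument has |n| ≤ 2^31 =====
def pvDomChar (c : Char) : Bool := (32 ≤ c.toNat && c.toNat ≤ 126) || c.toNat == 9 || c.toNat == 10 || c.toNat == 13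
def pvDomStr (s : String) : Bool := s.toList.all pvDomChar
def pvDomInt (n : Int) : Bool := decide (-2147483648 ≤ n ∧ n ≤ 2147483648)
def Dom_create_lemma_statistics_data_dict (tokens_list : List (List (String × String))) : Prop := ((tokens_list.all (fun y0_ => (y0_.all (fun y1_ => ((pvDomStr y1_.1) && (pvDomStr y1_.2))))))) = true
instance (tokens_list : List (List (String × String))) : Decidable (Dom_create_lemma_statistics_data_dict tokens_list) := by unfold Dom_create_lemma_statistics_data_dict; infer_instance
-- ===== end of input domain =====

-- B replaces A's streaming insert-if-absent loop with a len()-based counter by a set-then-sort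
-- algorithm: take the set of lowercased lemmas, sort it by first-occurrence index, number the
-- sorted list; same result because first-occurrence indices are distinct and increasing.

-- token['lemma_'].lower() (shared by both ports; .getD "" is unreachable under Pre_)
def pvKey (token : List (String × String)) : String :=
  PySem.Str.lower ((PySem.Dict.get? (PySem.Dict.mk token) "lemma_").getD "")

-- ===== PORT A =====
def create_lemma_statistics_data_dict (tokens_list : List (List (String × String))) : List (String × Int) :=
  (tokens_list.foldl
    (fun (lemma_dict : PySem.Dict String Int) token =>
      match lemma_dict.get? (pvKey token) with
      | none => lemma_dict.insert (pvKey token) ((lemma_dict.size : Int))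
      | some _ => lemma_dict)
    PySem.Dict.empty).items

-- ===== PORT B =====
-- keys.index k : the .getD 0 is unreachable — every element of set(keys) is in keys
def create_lemma_statistics_data_dict_alt (tokens_list : List (List (String × String))) : List (String × Int) :=
  let keys : List String := tokens_list.map pvKey
  let distinct : List String :=
    PySem.List.sorted (PySem.Set.ofList keys)
      (fun k => ((PySem.List.index? keys k).getD 0 : Int)) false
  (PySem.List.enumerate distinct 0).map (fun p => (p.2, p.1))

-- ===== PRECONDITION & SPEC =====
-- Pre_ excludes tokens without a 'lemma_' key, on which Python A raises KeyError.
def Pre_create_lemma_statistics_data_dict (tokens_list : List (List (String × String))) : Prop :=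
  (tokens_list.all (fun token => (PySem.Dict.mk token : PySem.Dict String String).contains "lemma_")) = true
instance (tokens_list : List (List (String × String))) : Decidable (Pre_create_lemma_statistics_data_dict tokens_list) := by unfold Pre_create_lemma_statistics_data_dict; infer_instance
def pvWitness_create_lemma_statistics_data_dict : (List (List (String × String))) :=
  [[("lemma_", "The"), ("pos_", "DET")], [("lemma_", "cat")], [("lemma_", "the")]]

def Spec_create_lemma_statistics_data_dict (tokens_list : List (List (String × String))) (out : List (String × Int)) : Prop := out = create_lemma_statistics_data_dict_alt tokens_list
instance (tokens_list : List (List (String × String))) (out : List (String × Int)) : Decidable (Spec_create_lemma_statistics_data_dict tokens_list out) := by unfold Spec_create_lemma_statistics_data_dict; infer_instance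

-- ===== CLAIM (what is proved, stated in full; the proofs are below) =====
def Claim_equal_create_lemma_statistics_data_dict : Prop := ∀ (tokens_list : List (List (String × String))), Dom_create_lemma_statistics_data_dict tokens_list → Pre_create_lemma_statistics_data_dict tokens_list → Spec_create_lemma_statistics_data_dict tokens_list (create_lemma_statistics_data_dict tokens_list)

-- ===== LEMMAS AND PROOFS =====

-- B's numbering of a key list starting at n
def pvNum (s : List String) (n : Int) : List (String × Int) :=
  (PySem.List.enumerate s n).map (fun p => (p.2, p.1))

theorem pvNum_nil (n : Int) : pvNum [] n = [] := rfl

theorem pvNum_cons (a : String) (s : List String) (n : Int) :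
    pvNum (a :: s) n = (a, n) :: pvNum s (n + 1) := by
  simp [pvNum, PySem.List.enumerate_cons]

theorem pvNum_append_singleton (s : List String) (k : String) (n : Int) :
    pvNum (s ++ [k]) n = pvNum s n ++ [(k, n + s.length)] := by
  induction s generalizing n with
  | nil => simp [pvNum_nil, pvNum_cons]
  | cons a s ih =>
      simp [pvNum_cons, ih]
      ring_nf

theorem length_pvNum (s : List String) (n : Int) : (pvNum s n).length = s.length := by
  simp [pvNum, PySem.List.length_enumerate]

theorem get?_mk_pvNum_eq_none_iff (s : List String) (n : Int) (k : String) :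
    (PySem.Dict.mk (pvNum s n)).get? k = none ↔ ¬ k ∈ s := by
  induction s generalizing n with
  | nil => simp [pvNum_nil, PySem.Dict.get?]
  | cons a s ih =>
      rw [pvNum_cons, PySem.Dict.get?_mk_cons]
      by_cases h : a = k
      · simp [h]
      · simp only [beq_iff_eq, h, if_false]
        rw [ih (n + 1)]
        simp [Ne.symm h]

theorem pvMain (keys : List String) (s : List String) :
    ((keys.foldl
        (fun (d : PySem.Dict String Int) key =>
          match d.get? key with
          | none => d.insert key ((d.size : Int))
          | some _ => d)
        (PySem.Dict.mk (pvNum s 0))).items)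
      = pvNum (keys.foldl PySem.Set.add s) 0 := by
  induction keys generalizing s with
  | nil => simp [List.foldl]
  | cons k keys ih =>
      by_cases hk : k ∈ s
      · have hget : ((PySem.Dict.mk (pvNum s 0)).get? k) ≠ none := by
          simp [get?_mk_pvNum_eq_none_iff, hk]
        obtain ⟨v, hv⟩ := Option.ne_none_iff_exists'.mp hget
        have hadd : PySem.Set.add s k = s := by
          simp [PySem.Set.add, PySem.Set.contains, hk]
        simp only [List.foldl_cons, hv, hadd]
        exact ih s
      · have hget : ((PySem.Dict.mk (pvNum s 0)).get? k) = none := by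
          rw [get?_mk_pvNum_eq_none_iff]; exact hk
        have hcont : (PySem.Dict.mk (pvNum s 0)).contains k = false :=
          (PySem.Dict.get?_eq_none_iff_contains _ _).mp hget
        have hins : (PySem.Dict.mk (pvNum s 0)).insert k (((PySem.Dict.mk (pvNum s 0)).size : Int))
            = PySem.Dict.mk (pvNum (s ++ [k]) 0) := by
          apply PySem.Dict.ext
          rw [PySem.Dict.items_insert_of_not_contains _ _ hcont]
          rw [pvNum_append_singleton]
          simp [PySem.Dict.size, length_pvNum]
        have hadd : PySem.Set.add s k = s ++ [k] := by
          simp [PySem.Set.add, PySem.Set.contains, hk]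
        simp only [List.foldl_cons, hget, hadd, hins]
        exact ih (s ++ [k])

-- first-occurrence index used as the sort key
def pvIdx (keys : List String) (k : String) : Int :=
  ((PySem.List.index? keys k).getD 0 : Int)

theorem pvIdx_lt_length (keys : List String) (k : String) (hk : k ∈ keys) :
    pvIdx keys k < (keys.length : Int) := by
  obtain ⟨m, hm⟩ := Option.isSome_iff_exists.mp ((PySem.List.index?_isSome_iff keys k).mpr hk)
  obtain ⟨hlt, -, -⟩ := PySem.List.getElem_of_index?_eq_some hm
  simp only [pvIdx, hm, Option.getD_some]
  exact_mod_cast hlt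

-- the distinct elements of keys, in first-occurrence order, have strictly increasing first indices
theorem pvOfList_pairwise_idx (keys : List String) :
    (PySem.Set.ofList keys).Pairwise (fun a b => pvIdx keys a < pvIdx keys b) := by
  induction keys using List.reverseRecOn with
  | nil => simp [PySem.Set.ofList]
  | append_singleton l k ih =>
      have hof : PySem.Set.ofList (l ++ [k]) = PySem.Set.add (PySem.Set.ofList l) k := by
        rw [PySem.Set.ofList_eq_foldl, PySem.Set.ofList_eq_foldl, List.foldl_append]
        rfl
      have hidx : ∀ a ∈ PySem.Set.ofList l, pvIdx (l ++ [k]) a = pvIdx l a := by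
        intro a ha
        have ha' : a ∈ l := (PySem.Set.mem_ofList _ _).mp ha
        simp only [pvIdx]
        rw [PySem.List.index?_append_of_mem _ ha']
      have hpw : (PySem.Set.ofList l).Pairwise (fun a b => pvIdx (l ++ [k]) a < pvIdx (l ++ [k]) b) := by
        refine List.Pairwise.imp_of_mem ?_ ih
        intro a b ha hb h
        rw [hidx a ha, hidx b hb]; exact h
      by_cases hk : k ∈ l
      · have : PySem.Set.add (PySem.Set.ofList l) k = PySem.Set.ofList l := by
          simp [PySem.Set.add, PySem.Set.contains, (PySem.Set.mem_ofList _ _).mpr hk]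
        rw [hof, this]; exact hpw
      · have hcont : (PySem.Set.ofList l).contains k = false := by
          simp [PySem.Set.contains, PySem.Set.mem_ofList]
          exact hk
        have : PySem.Set.add (PySem.Set.ofList l) k = PySem.Set.ofList l ++ [k] := by
          simp [PySem.Set.add, PySem.Set.contains, PySem.Set.mem_ofList]
          exact hk
        rw [hof, this]
        rw [List.pairwise_append]
        refine ⟨hpw, List.pairwise_singleton _ _, ?_⟩
        intro a ha b' hb'
        rw [List.mem_singleton] at hb'
        rw [hb']
        have ha' : a ∈ l := (PySem.Set.mem_ofList _ _).mp ha
        rw [hidx a ha]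
        have hkidx : pvIdx (l ++ [k]) k = (l.length : Int) := by
          simp only [pvIdx]
          rw [PySem.List.index?_append_singleton_self l k hk]
          rfl
        rw [hkidx]
        exact pvIdx_lt_length l a ha' 

-- sorting set(keys) by first-occurrence index yields exactly first-occurrence order
theorem pvSorted_eq (keys : List String) :
    PySem.List.sorted (PySem.Set.ofList keys)
      (fun k => ((PySem.List.index? keys k).getD 0 : Int)) false
      = PySem.Set.ofList keys := by
  have h := pvOfList_pairwise_idx keys
  simp only [pvIdx] at h
  exact PySem.List.sorted_eq_of_perm_of_pairwise_lt _ _ _ (List.Perm.refl _) h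

-- ===== VERDICT (by name: the statement is the Claim_ definition above) =====
theorem create_lemma_statistics_data_dict_spec : Claim_equal_create_lemma_statistics_data_dict := by
  intro tokens_list _ _
  have h := pvMain (tokens_list.map pvKey) []
  rw [List.foldl_map] at h
  unfold Spec_create_lemma_statistics_data_dict
  unfold create_lemma_statistics_data_dict create_lemma_statistics_data_dict_alt
  simp only
  rw [pvSorted_eq]
  rw [PySem.Set.ofList_eq_foldl]
  exact h
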